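-- pv_equiv track=rewrite | github.com/RAG139/atnotp | Embedder.py | MapToSubstrings
-- ===== SOURCE A (Python) =====
-- def MapToSubstrings(token, candSubstrings):
--     mapping = []; token = token.lower()
--
--     concat = ''
--     for candId in range(len(candSubstrings)):
--         substring = candSubstrings[candId]
--
--         if len(substring) >= 2 and substring[0] == '#' and substring[1] == '#':
--             substring = substring[2:]
--
--         concat += substring
--
--         if token == concat :
--             for id in range(candId + 1) :
--                 mapping.append(id)
--             break
--
--     return mapping
-- ===== SOURCE B (Python) =====
-- def MapToSubstrings(token, candSubstrings):
--     # Length-driven alternative: strip '##' in one pass, then scan cumulative lengths only;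
--     # a single join/compare happens at the unique index where lengths line up.
--     tok = token.lower()
--     pieces = [s[2:] if s.startswith('##') else s for s in candSubstrings]
--     total = 0
--     for i, p in enumerate(pieces):
--         total += len(p)
--         if total > len(tok):
--             return []
--         if total == len(tok):
--             return list(range(i + 1)) if ''.join(pieces[:i + 1]) == tok else []
--     return []
-- ===== Notes on version B (the rewrite author's own statement) =====
-- stated objective: alternative
-- what changed: B strips '##' in one map pass and then scans cumulative piece lengths only, doing a single join-and-compare at the unique index where the lengths line up, instead of A's ever-growing concatenation compared in full against the token at every step.
import Mathlib
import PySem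

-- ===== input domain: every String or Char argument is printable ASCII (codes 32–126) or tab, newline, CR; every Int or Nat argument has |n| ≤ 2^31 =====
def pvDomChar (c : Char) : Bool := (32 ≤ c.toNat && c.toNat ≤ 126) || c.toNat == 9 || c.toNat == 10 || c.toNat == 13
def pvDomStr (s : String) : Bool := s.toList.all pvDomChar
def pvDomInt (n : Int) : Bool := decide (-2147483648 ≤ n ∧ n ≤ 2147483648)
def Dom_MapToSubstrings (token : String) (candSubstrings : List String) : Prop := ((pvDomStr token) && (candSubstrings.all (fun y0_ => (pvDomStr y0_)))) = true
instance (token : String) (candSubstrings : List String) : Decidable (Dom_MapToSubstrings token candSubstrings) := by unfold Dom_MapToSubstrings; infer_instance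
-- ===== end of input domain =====

-- B strips '##' in one map pass, then scans cumulative piece lengths only and does a
-- single join-and-compare where the lengths line up (objective: alternative decomposition).

-- ===== PORT A =====
-- the for-loop over range(len(candSubstrings)) with break, carrying concat; mapping is
-- only filled right before the break, so a loop that ends without break returns [].
def MapToSubstringsLoopA (tok : List Char) (concat : List Char) (candId : Nat)
    (cands : List String) : List Int :=
  match cands with
  | [] => []
  | s :: rest =>
    let sub := s.toList
    let sub := if 2 ≤ sub.length ∧ sub[0]? = some '#' ∧ sub[1]? = some '#'
               then PySem.List.slice sub (some 2) none else sub
    let concat' := concat ++ sub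
    if tok = concat' then PySem.List.pyRange 0 (candId + 1) 1
    else MapToSubstringsLoopA tok concat' (candId + 1) rest

def MapToSubstrings (token : String) (candSubstrings : List String) : List Int :=
  MapToSubstringsLoopA (PySem.Chars.lower token.toList) [] 0 candSubstrings

-- ===== PORT B =====
-- the comprehension 's[2:] if s.startswith("##") else s'
def pvStripHash (s : List Char) : List Char :=
  if PySem.Chars.startswith s ['#', '#'] then PySem.List.slice s (some 2) none else s

-- the 'for i, p in enumerate(pieces)' loop carrying total; pieces kept whole for pieces[:i+1]
def MapToSubstringsLoopB (tok : List Char) (pieces : List (List Char))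
    (total i : Nat) (rem : List (List Char)) : List Int :=
  match rem with
  | [] => []
  | p :: rest =>
    let total' := total + p.length
    if tok.length < total' then []
    else if total' = tok.length then
      (if (pieces.take (i + 1)).flatten = tok then PySem.List.pyRange 0 (i + 1) 1 else [])
    else MapToSubstringsLoopB tok pieces total' (i + 1) rest

def MapToSubstrings_alt (token : String) (candSubstrings : List String) : List Int :=
  let tok := PySem.Chars.lower token.toList
  let pieces := candSubstrings.map (fun s => pvStripHash s.toList)
  MapToSubstringsLoopB tok pieces 0 0 pieces

-- ===== PRECONDITION & SPEC =====
def Spec_MapToSubstrings (token : String) (candSubstrings : List String) (out : List Int) : Prop := out = MapToSubstrings_alt token candSubstrings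
instance (token : String) (candSubstrings : List String) (out : List Int) : Decidable (Spec_MapToSubstrings token candSubstrings out) := by unfold Spec_MapToSubstrings; infer_instance

-- ===== CLAIM (what is proved, stated in full; the proofs are below) =====
def Claim_equal_MapToSubstrings : Prop := ∀ (token : String) (candSubstrings : List String), Dom_MapToSubstrings token candSubstrings → Spec_MapToSubstrings token candSubstrings (MapToSubstrings token candSubstrings)

-- ===== LEMMAS AND PROOFS =====

-- the two '##'-stripping conditions agree
theorem strip_cond_eq (l : List Char) :
    (2 ≤ l.length ∧ l[0]? = some '#' ∧ l[1]? = some '#') ↔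
      PySem.Chars.startswith l ['#', '#'] = true := by
  rw [PySem.Chars.startswith_iff]
  match l with
  | [] => simp
  | [a] => simp
  | a :: b :: t =>
    constructor
    · rintro ⟨-, h0, h1⟩
      simp at h0 h1
      subst h0; subst h1
      exact ⟨t, rfl⟩
    · rintro ⟨t', ht⟩
      simp at ht
      obtain ⟨ha, hb, -⟩ := ht
      subst ha; subst hb
      simp

-- once concat is not a prefix of the token, A's loop can never hit equality again
theorem loopA_dead (tok : List Char) (cands : List String) :
    ∀ (concat : List Char) (candId : Nat), ¬ concat <+: tok →
      MapToSubstringsLoopA tok concat candId cands = [] := by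
  induction cands with
  | nil => intro concat candId _; rfl
  | cons s rest ih =>
    intro concat candId h
    simp only [MapToSubstringsLoopA]
    generalize (if 2 ≤ s.toList.length ∧ s.toList[0]? = some '#' ∧ s.toList[1]? = some '#'
                then PySem.List.slice s.toList (some 2) none else s.toList) = sub
    rw [if_neg (fun heq : tok = concat ++ sub => h (heq ▸ ⟨sub, rfl⟩))]
    exact ih _ _ (fun hp => h (List.IsPrefix.trans ⟨sub, rfl⟩ hp))

-- a strictly longer list is never a prefix
theorem not_prefix_of_longer {α : Type} (l tok : List α) (h : tok.length < l.length) :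
    ¬ l <+: tok := fun hp => absurd hp.length_le (by omega)

-- A's inline '##' strip equals B's pvStripHash
theorem stripA_eq (s : List Char) :
    (if 2 ≤ s.length ∧ s[0]? = some '#' ∧ s[1]? = some '#'
     then PySem.List.slice s (some 2) none else s) = pvStripHash s := by
  unfold pvStripHash
  by_cases h : PySem.Chars.startswith s ['#', '#'] = true
  · rw [if_pos ((strip_cond_eq s).mpr h), if_pos h]
  · rw [if_neg (fun hc => h ((strip_cond_eq s).mp hc)), if_neg h]

-- core correspondence: A with accumulated concat ≡ B with cumulative lengths over pieces
theorem loop_eq (tok : List Char) (cands : List String) :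
    ∀ (concat : List Char) (i : Nat) (pieces : List (List Char)),
      (pieces.take i).flatten = concat →
      pieces.drop i = cands.map (fun s => pvStripHash s.toList) →
      MapToSubstringsLoopA tok concat i cands =
        MapToSubstringsLoopB tok pieces concat.length i
          (cands.map (fun s => pvStripHash s.toList)) := by
  induction cands with
  | nil => intro concat i pieces _ _; rfl
  | cons s cs ih =>
    intro concat i pieces htake hdrop
    simp only [MapToSubstringsLoopA, MapToSubstringsLoopB, List.map_cons, stripA_eq]
    simp only [List.map_cons] at hdrop
    generalize hsub : pvStripHash s.toList = sub at hdrop ⊢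
    have htake' : (pieces.take (i + 1)).flatten = concat ++ sub := by
      rw [List.take_add, List.flatten_append, htake, hdrop]
      simp
    have hdrop' : pieces.drop (i + 1) = cs.map (fun s => pvStripHash s.toList) := by
      have h1 : pieces.drop (i + 1) = (pieces.drop i).drop 1 := by
        rw [List.drop_drop]
      rw [h1, hdrop]
      rfl
    rcases lt_trichotomy tok.length (concat.length + sub.length) with hl | hl | hl
    · have hne : tok ≠ concat ++ sub := by
        intro h; rw [h] at hl; simp at hl
      rw [if_neg hne, if_pos hl]
      exact loopA_dead tok cs (concat ++ sub) (i + 1)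
        (not_prefix_of_longer _ _ (by simpa using hl))
    · rw [if_neg (show ¬ tok.length < concat.length + sub.length by omega),
        if_pos hl.symm, htake']
      by_cases heq : tok = concat ++ sub
      · rw [if_pos heq, if_pos heq.symm]
      · have hlen : (concat ++ sub).length = tok.length := by
          simp [hl]
        rw [if_neg heq, if_neg (fun h => heq h.symm)]
        exact loopA_dead tok cs (concat ++ sub) (i + 1)
          (fun hp => heq (hp.eq_of_length hlen).symm)
    · have hne : tok ≠ concat ++ sub := by
        intro h; rw [h] at hl; simp at hl
      rw [if_neg hne, if_neg (show ¬ tok.length < concat.length + sub.length by omega),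
        if_neg (show ¬ concat.length + sub.length = tok.length by omega)]
      have := ih (concat ++ sub) (i + 1) pieces htake' hdrop'
      simpa using this

-- ===== VERDICT (by name: the statement is the Claim_ definition above) =====
theorem MapToSubstrings_spec : Claim_equal_MapToSubstrings := by
  intro token cands _
  unfold Spec_MapToSubstrings MapToSubstrings MapToSubstrings_alt
  simpa using loop_eq (PySem.Chars.lower token.toList) cands [] 0
    (cands.map (fun s => pvStripHash s.toList)) rfl rfl
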